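-- pv_equiv track=rewrite | github.com/alicjarozycka/bwt | bwt.py | c_array
-- ===== SOURCE A (Python) =====
-- def c_array(bwt):
--     '''
--     Function name: c_array
--     Arguments: bwt
--     Returns: c_array
--     Function takes a character from BWT and returns how many characters in the BWT are smaller than it.
--     '''
--     c_array = {}
--     sorted_bwt = sorted(bwt)
--     starting_number = 0
--
--     for character in sorted_bwt:
--         if character not in c_array:
--             c_array[character] = starting_number
--         starting_number += 1
--
--     return c_array
-- ===== SOURCE B (Python) =====
-- def c_array(bwt):
--     counts = {}
--     for ch in bwt:
--         counts[ch] = counts.get(ch, 0) + 1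
--     out = {}
--     total = 0
--     for ch in sorted(counts):
--         out[ch] = total
--         total += counts[ch]
--     return out
-- ===== Notes on version B (the rewrite author's own statement) =====
-- stated objective: alternative
-- what changed: B never sorts the whole BWT: it builds a character-count dict in one pass and then assigns each sorted distinct character the running prefix-sum of counts, instead of A's full sort with a first-occurrence-index scan.
import Mathlib
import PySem

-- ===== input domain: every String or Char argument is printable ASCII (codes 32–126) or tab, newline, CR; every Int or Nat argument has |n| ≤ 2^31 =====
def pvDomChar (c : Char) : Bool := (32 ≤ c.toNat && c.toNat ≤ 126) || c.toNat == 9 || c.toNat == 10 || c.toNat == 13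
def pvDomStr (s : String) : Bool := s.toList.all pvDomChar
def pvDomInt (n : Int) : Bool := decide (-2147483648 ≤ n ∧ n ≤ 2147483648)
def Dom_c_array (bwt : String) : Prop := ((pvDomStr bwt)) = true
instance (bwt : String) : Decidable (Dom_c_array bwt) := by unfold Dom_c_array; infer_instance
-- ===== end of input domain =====

-- B never sorts the whole BWT: one counting pass, then prefix sums of the counts over
-- the sorted distinct characters (objective: alternative algorithm).
-- Both ports keep the Python dict (keyed by 1-char strings) as a Char-keyed PySem.Dict
-- and render it as (one-char string, value) pairs at return, per the type convention.

-- ===== PORT A =====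
def pvAStep (st : PySem.Dict Char Int × Int) (character : Char) : PySem.Dict Char Int × Int :=
  (if st.1.contains character then st.1 else st.1.insert character st.2, st.2 + 1)

def c_array (bwt : String) : List (String × Int) :=
  let sorted_bwt := PySem.List.sorted bwt.toList (fun x => x) false
  let r := sorted_bwt.foldl pvAStep (PySem.Dict.empty, 0)
  r.1.items.map (fun p => (String.ofList [p.1], p.2))

-- ===== PORT B =====
def c_array_alt (bwt : String) : List (String × Int) :=
  let counts := bwt.toList.foldl (fun d ch => d.insert ch (d.getD ch 0 + 1)) PySem.Dict.empty
  let r := (PySem.List.sorted counts.keys (fun x => x) false).foldl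
      (fun (st : PySem.Dict Char Int × Int) ch => (st.1.insert ch st.2, st.2 + counts.getD ch 0))
      (PySem.Dict.empty, 0)
  r.1.items.map (fun p => (String.ofList [p.1], p.2))

-- ===== PRECONDITION & SPEC =====
def Spec_c_array (bwt : String) (out : List (String × Int)) : Prop := out = c_array_alt bwt
instance (bwt : String) (out : List (String × Int)) : Decidable (Spec_c_array bwt out) := by unfold Spec_c_array; infer_instance

-- ===== CLAIM (what is proved, stated in full; the proofs are below) =====
def Claim_equal_c_array : Prop := ∀ (bwt : String), Dom_c_array bwt → Spec_c_array bwt (c_array bwt)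

-- ===== LEMMAS AND PROOFS =====

-- "sorted dedup": first element of each run of equal chars in an ordered list (proof device).
def pvSDedup : List Char → List Char
  | [] => []
  | a :: t => a :: pvSDedup (t.dropWhile (fun c => a == c))
termination_by l => l.length
decreasing_by
  simp only [List.length_cons]
  exact Nat.lt_succ_of_le (List.length_dropWhile_le _ _)

-- elements after the run of a are ≠ a in an ordered list
theorem pvDropNe : ∀ (t : List Char) (a : Char), t.Pairwise (· ≤ ·) → (∀ x ∈ t, a ≤ x) →
    ∀ c ∈ t.dropWhile (fun c => a == c), c ≠ a := by
  intro t
  induction t with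
  | nil => simp
  | cons b t₁ ih =>
    intro a hp hge c hc
    have hp' := List.pairwise_cons.mp hp
    by_cases hab : a = b
    · subst hab
      rw [List.dropWhile_cons_of_pos (by simp)] at hc
      exact ih a hp'.2 hp'.1 c hc
    · rw [List.dropWhile_cons_of_neg (by simp [hab])] at hc
      have hab' : a < b := lt_of_le_of_ne (hge b (by simp)) hab
      rcases List.mem_cons.mp hc with h | h
      · subst h; exact ne_of_gt hab'
      · exact ne_of_gt (lt_of_lt_of_le hab' (hp'.1 c h))

theorem pvSDedup_sublist : ∀ s : List Char, (pvSDedup s).Sublist s := by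
  intro s
  induction s using pvSDedup.induct with
  | case1 => simp [pvSDedup]
  | case2 a t ih =>
    rw [pvSDedup]
    exact List.Sublist.cons₂ a (ih.trans (List.dropWhile_sublist _))

theorem pvSDedup_mem : ∀ (s : List Char), s.Pairwise (· ≤ ·) → ∀ c ∈ s, c ∈ pvSDedup s := by
  intro s
  induction s using pvSDedup.induct with
  | case1 => simp
  | case2 a t ih =>
    intro hp c hc
    have hp' := List.pairwise_cons.mp hp
    rw [pvSDedup]
    by_cases hca : c = a
    · simp [hca]
    · rcases List.mem_cons.mp hc with h | h
      · exact absurd h hca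
      · have hsplit := List.takeWhile_append_dropWhile (p := fun c => a == c) (l := t)
        have hct : c ∈ t.takeWhile (fun c => a == c) ∨ c ∈ t.dropWhile (fun c => a == c) := by
          rw [← List.mem_append, hsplit]; exact h
        rcases hct with h' | h'
        · have hac : a = c := by simpa using List.mem_takeWhile_imp h'
          exact absurd hac.symm hca
        · have hdp : (t.dropWhile (fun c => a == c)).Pairwise (· ≤ ·) :=
            hp'.2.sublist (List.dropWhile_sublist _)
          exact List.mem_cons_of_mem a (ih hdp c h')

theorem pvSDedup_pairwise_lt : ∀ (s : List Char), s.Pairwise (· ≤ ·) →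
    (pvSDedup s).Pairwise (· < ·) := by
  intro s
  induction s using pvSDedup.induct with
  | case1 => simp [pvSDedup]
  | case2 a t ih =>
    intro hp
    have hp' := List.pairwise_cons.mp hp
    have hdp : (t.dropWhile (fun c => a == c)).Pairwise (· ≤ ·) :=
      hp'.2.sublist (List.dropWhile_sublist _)
    rw [pvSDedup, List.pairwise_cons]
    constructor
    · intro c hc
      have hcmem : c ∈ t.dropWhile (fun c => a == c) :=
        (pvSDedup_sublist _).mem hc
      have hne : c ≠ a := pvDropNe t a hp'.2 hp'.1 c hcmem
      exact lt_of_le_of_ne (hp'.1 c ((List.dropWhile_sublist _).mem hcmem)) (Ne.symm hne)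
    · exact ih hdp

-- fold of A's step over a run of an already-present char only advances the counter
theorem pvAStep_replicate : ∀ (m : Nat) (a : Char) (d : PySem.Dict Char Int) (t : Int),
    d.contains a = true →
    (List.replicate m a).foldl pvAStep (d, t) = (d, t + (m : Int)) := by
  intro m
  induction m with
  | zero => intro a d t _; simp
  | succ m ih =>
    intro a d t hc
    rw [List.replicate_succ, List.foldl_cons]
    have : pvAStep (d, t) a = (d, t + 1) := by simp [pvAStep, hc]
    rw [this, ih a d (t + 1) hc]
    congr 1
    push_cast; ring

-- MAIN: A's fold over an ordered list equals B's prefix-sum fold over its sorted dedup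
theorem pvMain : ∀ (n : Nat) (s : List Char), s.length ≤ n → s.Pairwise (· ≤ ·) →
    ∀ (f : Char → Int), (∀ c ∈ s, f c = (s.count c : Int)) →
    ∀ (d : PySem.Dict Char Int) (t : Int), (∀ c ∈ s, d.contains c = false) →
    s.foldl pvAStep (d, t) =
      (pvSDedup s).foldl (fun st ch => (st.1.insert ch st.2, st.2 + f ch)) (d, t) := by
  intro n
  induction n with
  | zero =>
    intro s hlen _ f _ d t _
    have : s = [] := List.eq_nil_of_length_eq_zero (Nat.le_zero.mp hlen)
    subst this; simp [pvSDedup]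
  | succ n ih =>
    intro s hlen hp f hf d t hd
    match s, hp, hlen, hf, hd with
    | [], _, _, _, _ => simp [pvSDedup]
    | a :: t₀, hp, hlen, hf, hd =>
      have hp' := List.pairwise_cons.mp hp
      set k := t₀.takeWhile (fun c => a == c) with hk
      set r := t₀.dropWhile (fun c => a == c) with hr
      have hsplit : t₀ = k ++ r := (List.takeWhile_append_dropWhile).symm
      have hkrep : k = List.replicate k.length a := by
        apply List.eq_replicate_of_mem
        intro b hb
        have hab2 : a = b := by simpa using List.mem_takeWhile_imp hb
        exact hab2.symm
      have hrne : ∀ c ∈ r, c ≠ a := pvDropNe t₀ a hp'.2 hp'.1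
      have hrsub : r.Sublist t₀ := List.dropWhile_sublist _
      -- counts
      have hcount_a : (a :: t₀).count a = k.length + 1 := by
        rw [hsplit, hkrep]
        have hra : r.count a = 0 := List.count_eq_zero.mpr (fun h => hrne a h rfl)
        simp [List.count_append, hra]
      have hcount_r : ∀ c ∈ r, (a :: t₀).count c = r.count c := by
        intro c hc
        have hac : a ≠ c := Ne.symm (hrne c hc)
        rw [hsplit, hkrep]
        simp [List.count_append, List.count_replicate, hac]
      -- LHS: consume a, then the run
      have h1 : pvAStep (d, t) a = (d.insert a t, t + 1) := by
        have ha : d.contains a = false := hd a (by simp)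
        simp [pvAStep, ha]
      -- fold over the run
      have h2 : (List.replicate k.length a).foldl pvAStep (d.insert a t, t + 1)
          = (d.insert a t, t + 1 + (k.length : Int)) :=
        pvAStep_replicate k.length a _ _ (PySem.Dict.contains_insert_self _ _ _)
      -- IH prerequisites on r
      have hrp : r.Pairwise (· ≤ ·) := hp'.2.sublist hrsub
      have hrf : ∀ c ∈ r, f c = (r.count c : Int) := by
        intro c hc
        rw [hf c (by simp [hsplit, List.mem_append, hc]), hcount_r c hc]
      have hrd : ∀ c ∈ r, (d.insert a t).contains c = false := by
        intro c hc
        rw [PySem.Dict.contains_insert]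
        have h1 : (c == a) = false := by simp [hrne c hc]
        have h2 : d.contains c = false := hd c (by simp [hsplit, List.mem_append, hc])
        simp [h1, h2]
      have hrlen : r.length ≤ n := by
        have := hrsub.length_le
        simp only [List.length_cons] at hlen
        omega
      have hIH := ih r hrlen hrp f hrf (d.insert a t) (t + 1 + (k.length : Int)) hrd
      -- assemble
      calc (a :: t₀).foldl pvAStep (d, t)
          = r.foldl pvAStep ((List.replicate k.length a).foldl pvAStep (pvAStep (d, t) a)) := by
            rw [List.foldl_cons]
            conv_lhs => rw [hsplit, hkrep]
            rw [List.foldl_append]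
        _ = r.foldl pvAStep (d.insert a t, t + 1 + (k.length : Int)) := by rw [h1, h2]
        _ = (pvSDedup r).foldl (fun st ch => (st.1.insert ch st.2, st.2 + f ch))
              (d.insert a t, t + 1 + (k.length : Int)) := hIH
        _ = (pvSDedup (a :: t₀)).foldl (fun st ch => (st.1.insert ch st.2, st.2 + f ch)) (d, t) := by
            rw [pvSDedup, List.foldl_cons]
            have hfa : f a = (k.length : Int) + 1 := by
              rw [hf a (by simp), hcount_a]; push_cast; ring
            have : t + f a = t + 1 + (k.length : Int) := by rw [hfa]; ring
            rw [this]

-- the sorted distinct characters ARE the sorted dedup of the sorted list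
theorem pvKeysEq (l : List Char) :
    PySem.List.sorted (PySem.Set.ofList l) (fun x => x) false
      = pvSDedup (PySem.List.sorted l (fun x => x) false) := by
  set s := PySem.List.sorted l (fun x => x) false with hs
  have hsp : s.Pairwise (· ≤ ·) := by
    simpa using PySem.List.sorted_pairwise (xs := l) (key := fun x => x)
  have hlt : (pvSDedup s).Pairwise (· < ·) := pvSDedup_pairwise_lt s hsp
  apply PySem.List.sorted_eq_of_perm_of_pairwise_lt
  · -- (pvSDedup s).Perm (Set.ofList l)
    have hnd1 : (pvSDedup s).Nodup := hlt.imp ne_of_lt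
    have hnd2 : (PySem.Set.ofList l).Nodup := PySem.Set.nodup_ofList l
    rw [List.perm_ext_iff_of_nodup hnd1 hnd2]
    intro c
    constructor
    · intro hc
      rw [PySem.Set.mem_ofList]
      have := (pvSDedup_sublist s).mem hc
      rwa [hs, PySem.List.mem_sorted] at this
    · intro hc
      rw [PySem.Set.mem_ofList] at hc
      exact pvSDedup_mem s hsp c (by rwa [hs, PySem.List.mem_sorted])
  · simpa using hlt

-- ===== VERDICT (by name: the statement is the Claim_ definition above) =====
theorem c_array_spec : Claim_equal_c_array := by
  intro bwt _
  unfold Spec_c_array c_array c_array_alt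
  set l := bwt.toList with hl
  have hcnt : l.foldl (fun d ch => d.insert ch (d.getD ch 0 + 1)) PySem.Dict.empty
      = PySem.Dict.counter l := PySem.Dict.foldl_insert_getD_add_one_eq_counter l
  simp only [hcnt, PySem.Dict.keys_counter, pvKeysEq]
  set s := PySem.List.sorted l (fun x => x) false with hs
  have hsp : s.Pairwise (· ≤ ·) := by
    simpa using PySem.List.sorted_pairwise (xs := l) (key := fun x => x)
  have hperm : s.Perm l := PySem.List.sorted_perm l _ _
  have hf : ∀ c ∈ s, (fun c => (PySem.Dict.counter l).getD c 0) c = (s.count c : Int) := by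
    intro c _
    simp only [PySem.Dict.getD_counter, hperm.count_eq]
  have hd : ∀ c ∈ s, (PySem.Dict.empty : PySem.Dict Char Int).contains c = false := by
    intro c _; simp
  have hmain := pvMain s.length s le_rfl hsp (fun c => (PySem.Dict.counter l).getD c 0) hf
      PySem.Dict.empty 0 hd
  rw [hmain]
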